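-- pv_equiv track=rewrite | github.com/bohuiKang/SSAFY-Algorithm-Study | 2512_december/dec_week2/stack_Q_2_function_development/dy_stack2.py | solution
-- ===== SOURCE A (Python) =====
-- import math
--
-- def solution(progresses, speeds):
--     answer = []
--     n = len(progresses)
--     for i in range(n):
--         # 100%완성까지 걸리는 기간으로 progresses 갱신
--         # ceil, 올림 함수
--         # (100 - 현재진도) / 속도 = 남은 일수 (올림 처리)
--         progresses[i] = math.ceil((100 - progresses[i]) / speeds[i])
--
--     # 현재 그룹의 첫 번째 기능 완료 일수
--     prev = progresses[0]
--     # 현재 그룹에 포함된 기능 개수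
--     cnt = 1
--     for j in range(1, n):
--         # 현재 기능이 이전 기능보다 먼저 또는 같은 날 완료되면
--         # 같은 날 배포 가능 (앞 기능이 완료될 때까지 기다림)
--         if prev >= progresses[j]:
--             cnt += 1
--         else:
--             # 아니라면 현재 기능 배포
--             answer.append(cnt)
--             # 직전값 갱신, 초기화
--             prev = progresses[j]
--             cnt = 1
--     # 마지막 그룹 추가
--     answer.append(cnt)
--     return answer
-- ===== SOURCE B (Python) =====
-- import math
--
-- def solution(progresses, speeds):
--     # same in-place overwrite as A: progresses[i] becomes days-to-finish
--     n = len(progresses)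
--     for i in range(n):
--         progresses[i] = math.ceil((100 - progresses[i]) / speeds[i])
--     # release-day table: each feature actually ships on the latest day seen so far
--     release = []
--     for d in progresses:
--         release.append(d if not release or d > release[-1] else release[-1])
--     # tally how many features ship on each release day (dict keeps first-appearance order)
--     tally = {}
--     for r in release:
--         tally[r] = tally.get(r, 0) + 1
--     return list(tally.values())
-- ===== Notes on version B (the rewrite author's own statement) =====
-- stated objective: alternative
-- what changed: A's flat running-(prev,cnt) grouping scan is replaced by computing each feature's actual release day as a running-maximum table and then tallying features per release day in an insertion-ordered dict, whose values are the group sizes.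
import Mathlib
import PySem

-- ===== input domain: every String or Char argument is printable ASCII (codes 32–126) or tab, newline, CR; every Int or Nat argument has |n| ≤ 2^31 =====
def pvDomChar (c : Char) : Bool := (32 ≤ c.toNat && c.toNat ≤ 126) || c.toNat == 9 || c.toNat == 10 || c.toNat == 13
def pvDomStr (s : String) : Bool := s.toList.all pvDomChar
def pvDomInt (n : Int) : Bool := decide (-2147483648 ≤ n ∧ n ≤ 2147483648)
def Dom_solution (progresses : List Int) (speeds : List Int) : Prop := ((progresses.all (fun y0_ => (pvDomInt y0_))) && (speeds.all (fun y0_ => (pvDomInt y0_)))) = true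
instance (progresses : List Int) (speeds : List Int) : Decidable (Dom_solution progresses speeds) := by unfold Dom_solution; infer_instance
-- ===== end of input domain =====

-- B replaces A's flat running-(prev,cnt) grouping scan by a release-day table
-- (running maximum per feature) tallied in an insertion-ordered dict whose
-- values are the group sizes (alternative structure, same cost); the
-- equivalence is about the return value only (both Pythons mutate
-- `progresses` in place identically).


-- ===== PORT A =====
-- shared first loop (identical in Source A and Source B): progresses[i] = math.ceil((100-progresses[i])/speeds[i]),
-- ported as exact ceiling division -((-(100-p)) // s); exact on Dom, where both operands have magnitude
-- ≤ 2^31 + 100 < 2^53, so the float quotient is never rounded across an integer boundary.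
def calcDays (progresses : List Int) (speeds : List Int) : List Int :=
  (PySem.List.pyRange 0 (progresses.length : Int) 1).foldl
    (fun ps i =>
      PySem.List.pySetD ps i
        (-(PySem.Int.floordiv (-(100 - PySem.List.pyGetD ps i 0)) (PySem.List.pyGetD speeds i 0))))
    progresses

-- A's loop body for the grouping scan
def stepA (st : List Int × Int × Int) (x : Int) : List Int × Int × Int :=
  if st.2.1 ≥ x then (st.1, st.2.1, st.2.2 + 1)
  else (st.1 ++ [st.2.2], x, 1)

def solution (progresses : List Int) (speeds : List Int) : List Int :=
  let ps := calcDays progresses speeds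
  let prev := PySem.List.pyGetD ps 0 0
  let r := (PySem.List.pyRange 1 (progresses.length : Int) 1).foldl
      (fun st j => stepA st (PySem.List.pyGetD ps j 0)) (([] : List Int), prev, 1)
  r.1 ++ [r.2.2]

-- ===== PORT B =====
-- Source B's second loop: release.append(d if not release or d > release[-1] else release[-1])
def relStep (acc : List Int) (d : Int) : List Int :=
  acc ++ [if acc = [] ∨ PySem.List.pyGetD acc (-1) 0 < d then d
          else PySem.List.pyGetD acc (-1) 0]

def solution_alt (progresses : List Int) (speeds : List Int) : List Int :=
  let days := calcDays progresses speeds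
  let release := days.foldl relStep []
  let tally := release.foldl (fun t r => t.insert r (t.getD r 0 + 1))
      (PySem.Dict.empty : PySem.Dict Int Int)
  tally.values

-- ===== PRECONDITION & SPEC =====
-- Pre_ excludes exactly the inputs on which A raises: empty progresses (IndexError at
-- progresses[0]), speeds shorter than progresses (IndexError), and a zero speed among
-- the used ones (ZeroDivisionError).
def Pre_solution (progresses : List Int) (speeds : List Int) : Prop :=
  progresses ≠ [] ∧ progresses.length ≤ speeds.length ∧
    ∀ s ∈ speeds.take progresses.length, s ≠ 0
instance (progresses : List Int) (speeds : List Int) : Decidable (Pre_solution progresses speeds) := by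
  unfold Pre_solution; infer_instance

def pvWitness_solution : List Int × List Int := ([93, 30, 55], [1, 30, 5])

def Spec_solution (progresses : List Int) (speeds : List Int) (out : List Int) : Prop := out = solution_alt progresses speeds
instance (progresses : List Int) (speeds : List Int) (out : List Int) : Decidable (Spec_solution progresses speeds out) := by unfold Spec_solution; infer_instance

-- ===== CLAIM (what is proved, stated in full; the proofs are below) =====
def Claim_equal_solution : Prop := ∀ (progresses : List Int) (speeds : List Int), Dom_solution progresses speeds → Pre_solution progresses speeds → Spec_solution progresses speeds (solution progresses speeds)

-- ===== LEMMAS AND PROOFS =====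

-- the first loop preserves the list length
theorem calcDays_length (progresses speeds : List Int) :
    (calcDays progresses speeds).length = progresses.length := by
  unfold calcDays
  generalize PySem.List.pyRange 0 (progresses.length : Int) 1 = is
  induction is generalizing progresses with
  | nil => rfl
  | cons i is ih =>
      simp only [List.foldl_cons]
      rw [ih]
      · exact PySem.List.length_pySetD _ _ _

-- A's grouping scan written as a recursion over the remaining days
def gA (prev cnt : Int) : List Int → List Int
  | [] => [cnt]
  | x :: xs => if prev ≥ x then gA prev (cnt + 1) xs else cnt :: gA x 1 xs

theorem foldl_stepA (xs : List Int) :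
    ∀ (a : List Int) (prev cnt : Int),
      (xs.foldl stepA (a, prev, cnt)).1 ++ [(xs.foldl stepA (a, prev, cnt)).2.2]
        = a ++ gA prev cnt xs := by
  induction xs with
  | nil => intro a prev cnt; simp [gA]
  | cons x xs ih =>
      intro a prev cnt
      by_cases h : prev ≥ x
      · simp [stepA, h, gA, ih]
      · simp [stepA, h, gA, ih]

-- running-maximum ("release day") sequence continuing from leader day c
def pmF (c : Int) : List Int → List Int
  | [] => []
  | x :: xs => max c x :: pmF (max c x) xs

-- run-length encoding of a list (the common meeting point of both proofs)
def rleL : List Int → List Int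
  | [] => []
  | x :: xs =>
      (1 + ((xs.takeWhile (fun y => y == x)).length : Int))
        :: rleL (xs.dropWhile (fun y => y == x))
  termination_by m => m.length
  decreasing_by
    simp only [List.length_cons]
    exact Nat.lt_succ_of_le (List.length_dropWhile_le _ _)

-- A's scan produces the run lengths of the running-maximum sequence
theorem gA_eq_rleL (xs : List Int) : ∀ (prev cnt : Int),
    gA prev cnt xs
      = (cnt + (((pmF prev xs).takeWhile (fun y => y == prev)).length : Int))
          :: rleL ((pmF prev xs).dropWhile (fun y => y == prev)) := by
  induction xs with
  | nil => intro prev cnt; simp [gA, pmF, rleL]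
  | cons x xs ih =>
      intro prev cnt
      by_cases h : prev ≥ x
      · have hm : max prev x = prev := max_eq_left h
        simp only [gA, h, if_true, pmF, hm, List.takeWhile_cons, BEq.rfl,
          List.dropWhile_cons, if_true, ih prev (cnt + 1)]
        rw [List.length_cons]
        congr 1
        push_cast
        ring
      · have hne : (x == prev) = false := by
          have : x ≠ prev := by omega
          simp [this]
        have hm : max prev x = x := max_eq_right (by omega)
        simp only [gA, h, if_false, pmF, hm, List.takeWhile_cons, hne,
          List.dropWhile_cons, if_false, ih x 1]
        simp [rleL]

theorem gA_one_eq_rleL (d : Int) (rest : List Int) :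
    gA d 1 rest = rleL (d :: pmF d rest) := by
  rw [gA_eq_rleL, rleL]

-- Source B's release loop builds exactly d :: pmF d rest
theorem pyGetD_append_singleton_neg_one (l : List Int) (c : Int) :
    PySem.List.pyGetD (l ++ [c]) (-1) 0 = c := by
  simp [PySem.List.pyGetD, PySem.List.pyGet?, PySem.List.pyIdx?]

theorem foldl_relStep (xs : List Int) : ∀ (l : List Int) (c : Int),
    xs.foldl relStep (l ++ [c]) = l ++ [c] ++ pmF c xs := by
  induction xs with
  | nil => intro l c; simp [pmF]
  | cons x xs ih =>
      intro l c
      have hstep : relStep (l ++ [c]) x = (l ++ [c]) ++ [max c x] := by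
        unfold relStep
        rw [pyGetD_append_singleton_neg_one]
        by_cases h : x ≤ c
        · simp [max_eq_left h, not_lt.mpr h]
        · simp [max_eq_right (le_of_not_ge h), lt_of_not_ge h]
      simp only [List.foldl_cons, hstep]
      rw [show (l ++ [c]) ++ [max c x] = (l ++ [c]) ++ [max c x] from rfl,
          ih (l ++ [c]) (max c x)]
      simp [pmF]

theorem release_eq (d : Int) (rest : List Int) :
    (d :: rest).foldl relStep [] = d :: pmF d rest := by
  have h0 : relStep [] d = [d] := by simp [relStep]
  simpa using (foldl_relStep rest [] d)

-- the release sequence is nondecreasing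
theorem isChain_pmF (xs : List Int) : ∀ (c : Int),
    List.IsChain (· ≤ ·) (c :: pmF c xs) := by
  induction xs with
  | nil => intro c; simp [pmF]
  | cons x xs ih =>
      intro c
      simp only [pmF]
      exact List.IsChain.cons_cons (le_max_left c x) (ih (max c x))

-- Set.ofList helpers
theorem foldl_add_of_mem (a : List Int) : ∀ (s : PySem.Set Int),
    (∀ y ∈ a, y ∈ s) → a.foldl PySem.Set.add s = s := by
  induction a with
  | nil => intro s _; rfl
  | cons y a ih =>
      intro s hs
      have hy : PySem.Set.contains s y = true := by
        simp [PySem.Set.contains]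
        exact hs y (by simp)
      simp only [List.foldl_cons, PySem.Set.add, hy, if_true]
      exact ih s (fun z hz => hs z (by simp [hz]))

theorem foldl_add_cons_not_mem (t : List Int) : ∀ (s : List Int) (x : Int),
    x ∉ t → t.foldl PySem.Set.add (x :: s) = x :: t.foldl PySem.Set.add s := by
  induction t with
  | nil => intro s x _; rfl
  | cons y t ih =>
      intro s x hx
      have hxy : x ≠ y := fun h => hx (by simp [h])
      have hc : PySem.Set.contains (x :: s) y = PySem.Set.contains s y := by
        simp only [PySem.Set.contains, List.contains_cons]
        rw [show (y == x) = false from by simp [Ne.symm hxy]]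
        simp
      simp only [List.foldl_cons, PySem.Set.add, hc]
      by_cases h : PySem.Set.contains s y = true
      · simp only [h, if_true]
        exact ih s x (fun hm => hx (by simp [hm]))
      · simp only [h, if_false, Bool.false_eq_true, if_false]
        rw [show x :: s ++ [y] = x :: (s ++ [y]) from rfl]
        exact ih (s ++ [y]) x (fun hm => hx (by simp [hm]))

-- the first element surviving dropWhile falsifies the predicate
theorem dropWhile_head_false (p : Int → Bool) : ∀ (l : List Int) (y : Int) (ts : List Int),
    l.dropWhile p = y :: ts → p y = false := by
  intro l
  induction l with
  | nil => intro y ts h; simp at h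
  | cons z l ih =>
      intro y ts h
      by_cases hz : p z = true
      · rw [List.dropWhile_cons_of_pos hz] at h
        exact ih y ts h
      · rw [List.dropWhile_cons_of_neg hz] at h
        cases h
        simpa using hz

-- distinct-value counts of a nondecreasing list, in first-appearance order,
-- are exactly its run lengths
theorem counts_eq_rleL : ∀ (n : Nat) (m : List Int), m.length ≤ n →
    List.IsChain (· ≤ ·) m →
    (PySem.Set.ofList m).map (fun k => ((m.count k : Nat) : Int)) = rleL m := by
  intro n
  induction n with
  | zero =>
      intro m hm _
      have : m = [] := List.eq_nil_of_length_eq_zero (Nat.le_zero.mp hm)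
      subst this; simp [rleL, PySem.Set.ofList]
  | succ n ih =>
      intro m hm hchain
      match m with
      | [] => simp [rleL, PySem.Set.ofList]
      | x :: xs =>
        have hpair : List.Pairwise (· ≤ ·) (x :: xs) := hchain.pairwise
        have hall : ∀ y ∈ xs, x ≤ y := (List.pairwise_cons.1 hpair).1
        have hxs : xs.takeWhile (fun y => y == x) ++ xs.dropWhile (fun y => y == x) = xs :=
          List.takeWhile_append_dropWhile
        have ha : ∀ y ∈ xs.takeWhile (fun y => y == x), y = x := by
          intro y hy
          have := List.mem_takeWhile_imp hy
          simpa using this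
        have hxt : x ∉ xs.dropWhile (fun y => y == x) := by
          intro hxin
          have htne : xs.dropWhile (fun y => y == x) ≠ [] := by
            intro h; rw [h] at hxin; simp at hxin
          obtain ⟨y, ts, hyt⟩ := List.exists_cons_of_ne_nil htne
          have hy : (y == x) = false := dropWhile_head_false (fun y => y == x) xs y ts hyt
          simp only [beq_eq_false_iff_ne, ne_eq] at hy
          have hyx : x ≤ y := hall y ((List.dropWhile_sublist _).mem (by rw [hyt]; simp))
          have hpt : List.Pairwise (· ≤ ·) (y :: ts) := by
            rw [← hyt]
            exact hpair.tail.sublist (List.dropWhile_sublist _)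
          rw [hyt] at hxin
          rcases List.mem_cons.1 hxin with h | h
          · exact hy h.symm
          · have : y ≤ x := (List.pairwise_cons.1 hpt).1 x h
            exact hy (by omega)
        -- counts
        have hka : ∀ k : Int, k ≠ x → k ∉ xs.takeWhile (fun y => y == x) := by
          intro k hk hmem; exact hk (ha k hmem)
        have hcx : List.count x (x :: xs)
            = 1 + (xs.takeWhile (fun y => y == x)).length := by
          rw [List.count_cons]
          simp only [BEq.rfl, if_true]
          have hx2 : List.count x xs = (xs.takeWhile (fun y => y == x)).length := by
            conv_lhs => rw [← hxs]
            rw [List.count_append,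
              List.count_eq_length.2 (fun b hb => (ha b hb).symm),
              List.count_eq_zero.2 hxt]
            omega
          omega
        have hck : ∀ k ∈ xs.dropWhile (fun y => y == x),
            List.count k (x :: xs) = List.count k (xs.dropWhile (fun y => y == x)) := by
          intro k hk
          have hkx : k ≠ x := fun h => hxt (h ▸ hk)
          rw [List.count_cons]
          have hk2 : List.count k xs = List.count k (xs.dropWhile (fun y => y == x)) := by
            conv_lhs => rw [← hxs]
            rw [List.count_append, List.count_eq_zero.2 (hka k hkx)]
            omega
          simp [hk2, Ne.symm hkx]
        -- set decomposition
        have hset : PySem.Set.ofList (x :: xs)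
            = x :: PySem.Set.ofList (xs.dropWhile (fun y => y == x)) := by
          rw [PySem.Set.ofList_eq_foldl, PySem.Set.ofList_eq_foldl]
          simp only [List.foldl_cons]
          have hadd0 : PySem.Set.add [] x = [x] := by
            simp [PySem.Set.add, PySem.Set.contains]
          rw [hadd0]
          conv_lhs => rw [← hxs]
          rw [List.foldl_append,
            foldl_add_of_mem _ [x] (fun y hy => by simp [ha y hy]),
            foldl_add_cons_not_mem _ [] x hxt]
        -- assemble
        rw [hset, List.map_cons, hcx]
        have htail : (PySem.Set.ofList (xs.dropWhile (fun y => y == x))).map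
              (fun k => ((List.count k (x :: xs) : Nat) : Int))
            = (PySem.Set.ofList (xs.dropWhile (fun y => y == x))).map
              (fun k => ((List.count k (xs.dropWhile (fun y => y == x)) : Nat) : Int)) := by
          apply List.map_congr_left
          intro k hk
          rw [hck k ((PySem.Set.mem_ofList _ _).1 hk)]
        rw [htail, ih (xs.dropWhile (fun y => y == x))
              (by
                have h1 := List.length_dropWhile_le (fun y => y == x) xs
                have h2 : (x :: xs).length ≤ n + 1 := hm
                simp only [List.length_cons] at h2
                omega)
              (by
                have : List.Pairwise (· ≤ ·) (xs.dropWhile (fun y => y == x)) :=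
                  hpair.tail.sublist (List.dropWhile_sublist _)
                exact this.isChain),
            rleL]
        push_cast
        ring_nf

-- ===== VERDICT (by name: the statement is the Claim_ definition above) =====
theorem solution_spec : Claim_equal_solution := by
  intro progresses speeds _hdom hpre
  obtain ⟨hne, -, -⟩ := hpre
  have hlen : (calcDays progresses speeds).length = progresses.length :=
    calcDays_length progresses speeds
  have hpsne : calcDays progresses speeds ≠ [] := by
    intro h
    exact hne (List.eq_nil_of_length_eq_zero (by rw [← hlen, h]; rfl))
  obtain ⟨d, rest, hcons⟩ := List.exists_cons_of_ne_nil hpsne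
  have hb : (progresses.length : Int) = (((d :: rest : List Int)).length : Int) := by
    rw [← hcons, hlen]
  unfold Spec_solution solution solution_alt
  simp only [hcons, hb]
  rw [PySem.List.foldl_pyRange_pyGetD' (xs := d :: rest) (a := 1) (d := 0)
        (f := stepA) (init := (([] : List Int), PySem.List.pyGetD (d :: rest) 0 0, 1))
        (by norm_num)]
  simp only [PySem.List.pyGetD_zero_cons]
  norm_num
  rw [foldl_stepA,
    show List.foldl relStep (relStep [] d) rest = d :: pmF d rest from by
      rw [← List.foldl_cons]; exact release_eq d rest,
    PySem.Dict.foldl_insert_getD_add_one_eq_counter]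
  simp only [PySem.Dict.values, PySem.Dict.items_counter, List.map_map]
  rw [show ((fun (x : Int × Int) => x.2) ∘ fun k => (k, ((d :: pmF d rest).count k : Int)))
        = (fun k => (((d :: pmF d rest).count k : Nat) : Int)) from rfl]
  rw [counts_eq_rleL (d :: pmF d rest).length (d :: pmF d rest) le_rfl (isChain_pmF rest d)]
  simp [gA_one_eq_rleL]
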